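-- pv_equiv track=rewrite | github.com/allanRoberto/revesbot-final | apps/signals/patterns/api.py | _normalize_bets
-- ===== SOURCE A (Python) =====
-- from typing import Any, Dict, List, Optional, Tuple
--
-- def _normalize_bets(payload: Dict[str, Any], max_numbers: int) -> List[int]:
--     raw = payload.get("suggestion")
--     if not isinstance(raw, list):
--         raw = payload.get("list")
--     if not isinstance(raw, list):
--         return []
--
--     bets: List[int] = []
--     for item in raw:
--         try:
--             n = int(item)
--         except (TypeError, ValueError):
--             continue
--         if n < 0 or n > 36:
--             continue
--         bets.append(n)
--     bets = sorted(bets)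
--     return bets[:max_numbers]
-- ===== SOURCE B (Python) =====
-- def _first_list(payload):
--     for key in ("suggestion", "list"):
--         value = payload.get(key)
--         if isinstance(value, list):
--             return value
--     return None
--
--
-- def _normalize_bets(payload, max_numbers):
--     raw = _first_list(payload)
--     if raw is None:
--         return []
--     vals = []
--     for item in raw:
--         try:
--             vals.append(int(item))
--         except (TypeError, ValueError):
--             pass
--     out = [i for i in range(37) for _ in range(vals.count(i))]
--     return out[:max_numbers]
-- ===== Notes on version B (the rewrite author's own statement) =====
-- stated objective: alternative
-- what changed: Drops the validate-append-comparison-sort pipeline: B parses all items, then emits each value i from 0 to 36 as many times as it occurs (count per bucket), which yields the sorted in-range list directly without any range filter or sort call.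
import Mathlib
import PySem

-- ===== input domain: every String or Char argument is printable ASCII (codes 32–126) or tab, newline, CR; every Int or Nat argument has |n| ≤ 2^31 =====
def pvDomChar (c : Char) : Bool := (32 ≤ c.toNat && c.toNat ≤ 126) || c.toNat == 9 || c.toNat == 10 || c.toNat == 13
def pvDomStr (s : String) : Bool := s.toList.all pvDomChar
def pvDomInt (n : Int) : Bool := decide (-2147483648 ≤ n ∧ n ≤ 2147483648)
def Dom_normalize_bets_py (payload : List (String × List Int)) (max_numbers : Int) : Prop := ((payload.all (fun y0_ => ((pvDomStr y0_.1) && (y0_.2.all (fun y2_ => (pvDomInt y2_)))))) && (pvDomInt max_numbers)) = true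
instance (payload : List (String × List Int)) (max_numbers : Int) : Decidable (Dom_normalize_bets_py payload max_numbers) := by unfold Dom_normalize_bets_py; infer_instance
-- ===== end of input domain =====

-- B replaces A's validate/append/comparison-sort pipeline by emitting each value 0..36
-- as many times as it occurs (per-bucket counting); return value proved equal (objective: alternative).

-- ===== PORT A =====
-- raw = payload.get("suggestion"), falling back to payload.get("list"); under the
-- List (String × List Int) model a present value is always a list, so 'not isinstance(raw, list)'
-- is exactly 'the key is absent'; int(item) is the identity on the Int items and never raises.
def normalize_bets_py (payload : List (String × List Int)) (max_numbers : Int) : List Int :=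
  let raw? : Option (List Int) :=
    match PySem.Dict.get? (PySem.Dict.mk payload) "suggestion" with
    | some r => some r
    | none => PySem.Dict.get? (PySem.Dict.mk payload) "list"
  match raw? with
  | none => []
  | some raw =>
      let bets : List Int :=
        raw.foldl (fun acc n => if n < 0 || 36 < n then acc else acc ++ [n]) []
      let bets := PySem.List.sorted bets (fun x => x) false
      PySem.List.slice bets none (some max_numbers)

-- ===== PORT B =====
-- _first_list: scan the keys ("suggestion", "list") in order, return the first present list.
def pvFirstList (d : PySem.Dict String (List Int)) : List String → Option (List Int)
  | [] => none
  | k :: ks =>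
    match PySem.Dict.get? d k with
    | some v => some v
    | none => pvFirstList d ks

def normalize_bets_py_alt (payload : List (String × List Int)) (max_numbers : Int) : List Int :=
  match pvFirstList (PySem.Dict.mk payload) ["suggestion", "list"] with
  | none => []
  | some raw =>
      -- vals: int(item) for each item; on Int items int() is the identity and never raises
      let vals : List Int := raw.map (fun item => item)
      -- [i for i in range(37) for _ in range(vals.count(i))]
      let out : List Int :=
        (List.range 37).flatMap (fun (i : Nat) => List.replicate (vals.count (i : Int)) ((i : Int)))
      PySem.List.slice out none (some max_numbers)

-- ===== PRECONDITION & SPEC =====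
def Spec_normalize_bets_py (payload : List (String × List Int)) (max_numbers : Int) (out : List Int) : Prop := out = normalize_bets_py_alt payload max_numbers
instance (payload : List (String × List Int)) (max_numbers : Int) (out : List Int) : Decidable (Spec_normalize_bets_py payload max_numbers out) := by unfold Spec_normalize_bets_py; infer_instance

-- ===== CLAIM =====
def Claim_equal_normalize_bets_py : Prop := ∀ (payload : List (String × List Int)) (max_numbers : Int), Dom_normalize_bets_py payload max_numbers → Spec_normalize_bets_py payload max_numbers (normalize_bets_py payload max_numbers)

-- ===== LEMMAS AND PROOFS =====

-- A's append loop builds the in-range filter of raw.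
theorem pv_bets_eq_filter (raw : List Int) :
    raw.foldl (fun acc n => if n < 0 || 36 < n then acc else acc ++ [n]) [] =
      raw.filter (fun n => 0 ≤ n && n ≤ 36) := by
  have h : ∀ (acc : List Int),
      raw.foldl (fun acc n => if n < 0 || 36 < n then acc else acc ++ [n]) acc =
        acc ++ raw.filter (fun n => 0 ≤ n && n ≤ 36) := by
    induction raw with
    | nil => simp
    | cons x xs ih =>
        intro acc
        rw [List.foldl_cons, List.filter_cons]
        by_cases hx : x < 0 ∨ 36 < x
        · have hb : (x < 0 || 36 < x) = true := by
            simp only [Bool.or_eq_true, decide_eq_true_eq]; exact hx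
          have hf : (0 ≤ x && x ≤ 36) = false := by
            simp only [Bool.and_eq_false_iff, decide_eq_false_iff_not]; omega
          rw [if_pos hb]
          simp only [hf, Bool.false_eq_true, if_false]
          exact ih acc
        · have hb : ¬ ((x < 0 || 36 < x) = true) := by
            simp only [Bool.or_eq_true, decide_eq_true_eq]; omega
          have hf : (0 ≤ x && x ≤ 36) = true := by
            simp only [Bool.and_eq_true, decide_eq_true_eq]; omega
          rw [if_neg hb, if_pos hf]
          simpa using ih (acc ++ [x])
  simpa using h []

-- every element of the bucket emission for range n is in [0, n)
theorem pv_flat_mem (c : Nat → Nat) (n : Nat) :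
    ∀ x ∈ (List.range n).flatMap (fun i => List.replicate (c i) (i : Int)), 0 ≤ x ∧ x < n := by
  intro x hx
  simp only [List.mem_flatMap, List.mem_range, List.mem_replicate] at hx
  obtain ⟨i, hi, -, rfl⟩ := hx
  constructor
  · positivity
  · exact_mod_cast hi

-- the bucket emission is nondecreasing
theorem pv_flat_pairwise (c : Nat → Nat) (n : Nat) :
    ((List.range n).flatMap (fun i => List.replicate (c i) (i : Int))).Pairwise (· ≤ ·) := by
  induction n with
  | zero => simp
  | succ m ih =>
      rw [List.range_succ, List.flatMap_append]
      rw [List.pairwise_append]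
      refine ⟨ih, ?_, ?_⟩
      · simp only [List.flatMap_cons, List.flatMap_nil, List.append_nil]
        exact List.pairwise_replicate.mpr (Or.inr le_rfl)
      · intro a ha b hb
        have h1 := (pv_flat_mem c m a ha).2
        have h2 := (List.mem_replicate.mp (by simpa using hb)).2
        subst h2
        exact le_of_lt (by exact_mod_cast h1)

-- multiplicity in the bucket emission
theorem pv_flat_count (c : Nat → Nat) (n : Nat) (j : Int) :
    ((List.range n).flatMap (fun i => List.replicate (c i) (i : Int))).count j
      = if 0 ≤ j ∧ j < n then c j.toNat else 0 := by
  induction n with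
  | zero =>
      simp only [List.range_zero, List.flatMap_nil, List.count_nil]
      split
      · next h => exfalso; omega
      · rfl
  | succ m ih =>
      rw [List.range_succ, List.flatMap_append, List.count_append, ih]
      simp only [List.flatMap_cons, List.flatMap_nil, List.append_nil, List.count_replicate]
      simp only [beq_iff_eq]
      by_cases hj2 : j = (m : Int)
      · rw [if_neg (by omega), if_pos hj2.symm, if_pos (by push_cast; omega)]
        simp [hj2]
      · rw [if_neg (show ¬ ((m : Int) = j) from fun h => hj2 h.symm)]
        by_cases hj : 0 ≤ j ∧ j < (m : Int)
        · rw [if_pos hj, if_pos (by push_cast; omega)]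
          omega
        · rw [if_neg hj, if_neg (by push_cast; omega)]

-- count of j in the in-range filter: equals raw's count for in-range j, else 0
theorem pv_count_filter (raw : List Int) (j : Int) :
    (raw.filter (fun n => 0 ≤ n && n ≤ 36)).count j
      = if 0 ≤ j ∧ j ≤ 36 then raw.count j else 0 := by
  induction raw with
  | nil => simp
  | cons x xs ih =>
      rw [List.filter_cons, List.count_cons]
      by_cases hx : (0 ≤ x && x ≤ 36) = true
      · rw [if_pos hx, List.count_cons, ih]
        simp only [Bool.and_eq_true, decide_eq_true_eq] at hx
        by_cases hxj : x = j
        · subst hxj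
          simp [hx.1, hx.2]
        · simp [hxj]
      · simp only [Bool.not_eq_true] at hx
        rw [if_neg (by simp [hx]), ih]
        simp only [Bool.and_eq_false_iff, decide_eq_false_iff_not] at hx
        by_cases hj : 0 ≤ j ∧ j ≤ 36
        · have hxj : ¬ (x = j) := by rcases hx with h | h <;> omega
          simp [hxj, hj]
        · simp [hj]

-- the core: bucket emission by counts equals sorted(filter)
theorem pv_core (raw : List Int) :
    PySem.List.sorted (raw.foldl (fun acc n => if n < 0 || 36 < n then acc else acc ++ [n]) [])
        (fun x => x) false
      = (List.range 37).flatMap (fun (i : Nat) => List.replicate (raw.count (i : Int)) ((i : Int))) := by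
  rw [pv_bets_eq_filter]
  apply PySem.List.sorted_id_eq_of_perm_of_pairwise
  · rw [List.perm_iff_count]
    intro j
    rw [pv_flat_count (fun i => raw.count (i : Int)) 37 j, pv_count_filter]
    by_cases hj : 0 ≤ j ∧ j ≤ 36
    · rw [if_pos hj, if_pos (by push_cast; omega)]
      rw [Int.toNat_of_nonneg hj.1]
    · rw [if_neg hj, if_neg (by push_cast; omega)]
  · exact pv_flat_pairwise (fun i => raw.count (i : Int)) 37

-- A's two-step key lookup computes the same optional list as B's key scan.
theorem pv_lookup_eq (d : PySem.Dict String (List Int)) :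
    (match PySem.Dict.get? d "suggestion" with
     | some r => some r
     | none => PySem.Dict.get? d "list")
      = pvFirstList d ["suggestion", "list"] := by
  unfold pvFirstList
  cases PySem.Dict.get? d "suggestion" with
  | some r => rfl
  | none =>
      unfold pvFirstList
      cases PySem.Dict.get? d "list" <;> rfl

-- ===== VERDICT =====
theorem normalize_bets_py_spec : Claim_equal_normalize_bets_py := by
  intro payload max_numbers _
  unfold Spec_normalize_bets_py normalize_bets_py normalize_bets_py_alt
  rw [← pv_lookup_eq (PySem.Dict.mk payload)]
  cases PySem.Dict.get? (PySem.Dict.mk payload) "suggestion" with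
  | some r => simp only [List.map_id']; rw [pv_core r]
  | none =>
      cases PySem.Dict.get? (PySem.Dict.mk payload) "list" with
      | none => rfl
      | some r => simp only [List.map_id']; rw [pv_core r]
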